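-- pv_equiv track=rewrite | github.com/Dan-jpg2/CSIK_Prog | modul10/o0_to_o5.py | count_by_date
-- ===== SOURCE A (Python) =====
-- def count_by_date(transfers):
--     n = len(transfers)
--     d = {}
--     i = 0
--     while i < n:
--         timestamp = transfers[i][0]
--         date = timestamp[:10] # eller timestamp.split("T")[0]
--         if date not in d:
--             d[date] = 1
--         else:
--             d[date] += 1
--         i += 1
--     return d
-- ===== SOURCE B (Python) =====
-- def count_by_date(transfers):
--     dates = [t[0][:10] for t in transfers]
--     return {date: dates.count(date) for date in dict.fromkeys(dates)}
-- ===== Notes on version B (the rewrite author's own statement) =====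
-- stated objective: alternative
-- what changed: Replaces the index-driven while loop that increments a dict counter per element with a two-pass strategy: materialize all date prefixes, dedup them in first-occurrence order via dict.fromkeys, and count each distinct date with list.count.
import Mathlib
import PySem

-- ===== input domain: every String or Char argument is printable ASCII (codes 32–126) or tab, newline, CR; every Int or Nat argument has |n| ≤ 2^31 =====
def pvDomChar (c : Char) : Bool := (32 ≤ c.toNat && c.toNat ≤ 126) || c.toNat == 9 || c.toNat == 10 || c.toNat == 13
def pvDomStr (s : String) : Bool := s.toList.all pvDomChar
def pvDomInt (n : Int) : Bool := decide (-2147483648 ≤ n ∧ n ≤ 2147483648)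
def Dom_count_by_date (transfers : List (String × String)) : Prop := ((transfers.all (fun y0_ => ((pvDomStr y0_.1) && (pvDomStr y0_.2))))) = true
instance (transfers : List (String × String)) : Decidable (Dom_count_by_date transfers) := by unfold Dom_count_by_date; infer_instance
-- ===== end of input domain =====

-- B replaces A's index-driven counting loop by two passes (dedup the date prefixes in
-- first-occurrence order, then count each distinct date); same result, alternative structure.

-- ===== PORT A =====
-- while i < n: timestamp = transfers[i][0]; date = timestamp[:10]; count into dict d; return d
def count_by_date (transfers : List (String × String)) : List (String × Int) :=
  let n : Int := PySem.List.len transfers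
  let d : PySem.Dict String Int :=
    (PySem.List.pyRange 0 n 1).foldl
      (fun d i =>
        let timestamp := (PySem.List.pyGetD transfers i ("", "")).1
        let date := PySem.Str.slice timestamp none (some 10)
        if d.contains date = false then d.insert date 1 else d.modify date 0 (· + 1))
      PySem.Dict.empty
  d.items

-- ===== PORT B =====
-- dates = [t[0][:10] for t in transfers]; {date: dates.count(date) for date in dict.fromkeys(dates)}
def count_by_date_alt (transfers : List (String × String)) : List (String × Int) :=
  let dates := transfers.map (fun t => PySem.Str.slice t.1 none (some 10))
  (PySem.List.dedup dates).map (fun date => (date, (PySem.List.count dates date : Int)))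

-- ===== PRECONDITION & SPEC =====
def Spec_count_by_date (transfers : List (String × String)) (out : List (String × Int)) : Prop := out = count_by_date_alt transfers
instance (transfers : List (String × String)) (out : List (String × Int)) : Decidable (Spec_count_by_date transfers out) := by unfold Spec_count_by_date; infer_instance

-- ===== CLAIM (what is proved, stated in full; the proofs are below) =====
def Claim_equal_count_by_date : Prop := ∀ (transfers : List (String × String)), Dom_count_by_date transfers → Spec_count_by_date transfers (count_by_date transfers)

-- ===== LEMMAS AND PROOFS =====

-- A's loop step (insert 1 on a fresh date, += 1 on a seen one) is exactly the Counter step.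
theorem step_eq_modify (d : PySem.Dict String Int) (k : String) :
    (if d.contains k = false then d.insert k 1 else d.modify k 0 (· + 1)) = d.modify k 0 (· + 1) := by
  by_cases h : d.contains k
  · simp [h]
  · simp only [Bool.not_eq_true] at h
    simp only [h]
    apply PySem.Dict.ext
    simp [PySem.Dict.insert, PySem.Dict.modify, h, PySem.Dict.getD_of_not_contains]

-- ===== VERDICT (by name: the statement is the Claim_ definition above) =====
theorem count_by_date_spec : Claim_equal_count_by_date := by
  intro transfers _
  unfold Spec_count_by_date count_by_date count_by_date_alt
  dsimp only
  have h := PySem.List.foldl_pyRange_pyGetD transfers ("", "")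
      (fun (d : PySem.Dict String Int) (t : String × String) =>
        if d.contains (PySem.Str.slice t.1 none (some 10)) = false
        then d.insert (PySem.Str.slice t.1 none (some 10)) 1
        else d.modify (PySem.Str.slice t.1 none (some 10)) 0 (· + 1))
      PySem.Dict.empty (a := 0) (by norm_num)
  simp only [List.drop_zero, Int.toNat_zero] at h
  simp only [h]
  rw [PySem.List.foldl_congr_mem transfers
      (fun (d : PySem.Dict String Int) (t : String × String) =>
        if d.contains (PySem.Str.slice t.1 none (some 10)) = false
        then d.insert (PySem.Str.slice t.1 none (some 10)) 1
        else d.modify (PySem.Str.slice t.1 none (some 10)) 0 (· + 1))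
      (fun d (t : String × String) =>
        d.modify (PySem.Str.slice t.1 none (some 10)) 0 (· + 1))
      PySem.Dict.empty
      (fun acc x _ => step_eq_modify acc (PySem.Str.slice x.1 none (some 10)))]
  have h2 : PySem.Dict.counter (transfers.map (fun t => PySem.Str.slice t.1 none (some 10))) =
      List.foldl (fun (d : PySem.Dict String Int) (t : String × String) =>
        d.modify (PySem.Str.slice t.1 none (some 10)) 0 (· + 1)) PySem.Dict.empty transfers := by
    rw [PySem.Dict.counter_eq_foldl]
    exact List.foldl_map
  rw [← h2, PySem.Dict.items_counter]
  simp [PySem.List.count_eq]
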